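-- pv_equiv track=rewrite | github.com/youthlx/ToLuLu | practice/answer.py | boom_cover
-- ===== SOURCE A (Python) =====
-- puke_code = {
-- 	'3': 3, '4': 4, '5': 5, '6': 6, '7': 7, '8': 8, '9': 9, '10': 10,
-- 	'J': 11, 'Q': 12, 'K': 13, 'A': 14, '2': 16, 'black_joker': 17, 'color_joker': 18,
-- }
--
-- puke_code_reverse = {
-- 	3: '3', 4: '4', 5: '5', 6: '6', 7: '7', 8: '8', 9: '9', 10: '10',
-- 	11: 'J', 12: 'Q', 13: 'K', 14: 'A', 16: '2', 17: 'black_joker', 18: 'color_joker',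
-- }
--
-- def decode_and_tidy(*args):
-- 	cards = [puke_code[arg] for arg in args]
-- 	cards.sort()
-- 	return cards
--
-- def encode_card(*args):
-- 	return [puke_code_reverse[arg] for arg in args]
--
-- def boom_cover(enemy_cards, my_cards):
-- 	if 'black_joker' in enemy_cards:
-- 		return []
-- 	my_cards = decode_and_tidy(*my_cards)
-- 	enemy_cards = decode_and_tidy(*enemy_cards)
-- 	if 17 in my_cards and 18 in my_cards:
-- 		return encode_card(17, 18)
-- 	if len(my_cards) < 4:
-- 		return []
-- 	for i in range(len(my_cards) - 3):
-- 		if my_cards[i] == my_cards[i + 3] and my_cards[i] > enemy_cards[0]: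
-- 			return encode_card(my_cards[i], my_cards[i], my_cards[i], my_cards[i])
-- 	return []
-- ===== SOURCE B (Python) =====
-- puke_code = {
-- 	'3': 3, '4': 4, '5': 5, '6': 6, '7': 7, '8': 8, '9': 9, '10': 10,
-- 	'J': 11, 'Q': 12, 'K': 13, 'A': 14, '2': 16, 'black_joker': 17, 'color_joker': 18,
-- }
--
-- puke_code_reverse = {
-- 	3: '3', 4: '4', 5: '5', 6: '6', 7: '7', 8: '8', 9: '9', 10: '10',
-- 	11: 'J', 12: 'Q', 13: 'K', 14: 'A', 16: '2', 17: 'black_joker', 18: 'color_joker',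
-- }
--
-- def boom_cover(enemy_cards, my_cards):
-- 	if 'black_joker' in enemy_cards:
-- 		return []
-- 	mine = [puke_code[c] for c in my_cards]
-- 	if 17 in mine and 18 in mine:
-- 		return ['black_joker', 'color_joker']
-- 	cands = sorted(v for v in set(mine) if mine.count(v) >= 4)
-- 	if cands:
-- 		enemy_min = min(puke_code[c] for c in enemy_cards)
-- 		for v in cands:
-- 			if v > enemy_min:
-- 				return [puke_code_reverse[v]] * 4
-- 	return []
-- ===== Notes on version B (the rewrite author's own statement) =====
-- stated objective: idiomatic
-- what changed: B replaces A's sort-the-hand-and-slide-a-width-4-window scan with a count-based candidate search: decode the hand once, take the distinct values occurring at least 4 times, sort those candidates and return the first one beating the enemy minimum (computed lazily only when a candidate exists).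
import Mathlib
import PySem

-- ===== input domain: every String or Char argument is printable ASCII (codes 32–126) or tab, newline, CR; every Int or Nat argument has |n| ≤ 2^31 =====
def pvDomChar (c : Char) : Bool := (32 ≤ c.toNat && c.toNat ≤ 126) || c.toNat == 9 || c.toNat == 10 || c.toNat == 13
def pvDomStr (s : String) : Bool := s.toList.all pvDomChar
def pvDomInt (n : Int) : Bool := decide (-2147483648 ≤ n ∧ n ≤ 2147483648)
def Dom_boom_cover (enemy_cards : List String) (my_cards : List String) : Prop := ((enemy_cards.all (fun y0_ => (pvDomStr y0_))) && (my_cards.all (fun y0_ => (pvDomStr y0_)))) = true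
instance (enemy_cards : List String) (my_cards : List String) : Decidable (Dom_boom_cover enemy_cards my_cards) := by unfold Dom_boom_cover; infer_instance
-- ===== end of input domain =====

-- B replaces A's sorted-hand width-4 sliding-window scan by a count-based candidate search
-- (distinct values with count >= 4, sorted, first one beating the lazily computed enemy minimum);
-- equal return values on Pre_ (valid card names; excluding the inputs where Python A raises).


-- ===== PORT A =====
-- shared by both ports: the module dicts puke_code / puke_code_reverse as lookup functions
-- (pvCode? s = puke_code.get(s): none = KeyError, excluded by Pre_)
def pvCode? (s : String) : Option Int :=
  if s = "3" then some 3 else if s = "4" then some 4 else if s = "5" then some 5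
  else if s = "6" then some 6 else if s = "7" then some 7 else if s = "8" then some 8
  else if s = "9" then some 9 else if s = "10" then some 10 else if s = "J" then some 11
  else if s = "Q" then some 12 else if s = "K" then some 13 else if s = "A" then some 14
  else if s = "2" then some 16 else if s = "black_joker" then some 17
  else if s = "color_joker" then some 18 else none

def pvRev (n : Int) : String :=
  if n = 3 then "3" else if n = 4 then "4" else if n = 5 then "5"
  else if n = 6 then "6" else if n = 7 then "7" else if n = 8 then "8"
  else if n = 9 then "9" else if n = 10 then "10" else if n = 11 then "J"
  else if n = 12 then "Q" else if n = 13 then "K" else if n = 14 then "A"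
  else if n = 16 then "2" else if n = 17 then "black_joker"
  else if n = 18 then "color_joker" else ""

-- A's 'for i in range(len(my)-3)' over the sorted hand, as the obvious structural
-- recursion on successive suffixes: the window is (a, _, _, d) = (my[i], my[i+3]);
-- enemy[0] is read (PySem.List.pyGet?) only when the window matches, exactly as Python's
-- short-circuit 'and' does (none = IndexError there, excluded by Pre_).
def pvLoopA (en : List Int) : List Int → List String
  | a :: b :: c :: d :: t =>
    if a = d then
      match PySem.List.pyGet? en 0 with
      | some e => if e < a then [pvRev a, pvRev a, pvRev a, pvRev a]
                  else pvLoopA en (b :: c :: d :: t)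
      | none => []
    else pvLoopA en (b :: c :: d :: t)
  | _ => []

def boom_cover (enemy_cards : List String) (my_cards : List String) : List String :=
  if "black_joker" ∈ enemy_cards then []
  else
    match my_cards.mapM pvCode?, enemy_cards.mapM pvCode? with
    | some mc, some ec =>
      let my := PySem.List.sorted mc (fun x => x) false
      let en := PySem.List.sorted ec (fun x => x) false
      if (17 : Int) ∈ my ∧ (18 : Int) ∈ my then ["black_joker", "color_joker"]
      else if my.length < 4 then []
      else pvLoopA en my
    | _, _ => []   -- KeyError in decode_and_tidy, excluded by Pre_

-- ===== PORT B =====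
-- first candidate value v (ascending) with v > enemy_min, as four encoded copies
def pvFindCand (emin : Int) : List Int → List String
  | [] => []
  | v :: rest => if emin < v then [pvRev v, pvRev v, pvRev v, pvRev v]
                 else pvFindCand emin rest

def boom_cover_alt (enemy_cards : List String) (my_cards : List String) : List String :=
  if "black_joker" ∈ enemy_cards then []
  else
    match my_cards.mapM pvCode? with
    | none => []   -- KeyError, excluded by Pre_
    | some mine =>
      if (17 : Int) ∈ mine ∧ (18 : Int) ∈ mine then ["black_joker", "color_joker"]
      else
        let cands := PySem.List.sorted
          ((PySem.Set.ofList mine).filter (fun v => 4 ≤ mine.count v)) (fun x => x) false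
        match cands with
        | [] => []
        | _ :: _ =>
          match enemy_cards.mapM pvCode? with
          | none => []   -- KeyError, excluded by Pre_
          | some ec =>
            match PySem.List.min? ec (fun x => x) with
            | none => []   -- ValueError on empty enemy, excluded by Pre_
            | some emin => pvFindCand emin cands

-- ===== PRECONDITION & SPEC =====
def pvValidCards : List String :=
  ["3", "4", "5", "6", "7", "8", "9", "10", "J", "Q", "K", "A", "2", "black_joker", "color_joker"]

-- Pre_ admits exactly the inputs on which Python A returns: either the early black_joker
-- exit fires, or every card name is a valid key of puke_code (else KeyError) and it is not
-- the case that the enemy hand is empty while my hand holds no rocket but does hold four of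
-- a kind (there A reads enemy_cards[0] of an empty list: IndexError; B raises ValueError).
def Pre_boom_cover (enemy_cards : List String) (my_cards : List String) : Prop :=
  "black_joker" ∈ enemy_cards ∨
  ((∀ c ∈ enemy_cards, c ∈ pvValidCards) ∧ (∀ c ∈ my_cards, c ∈ pvValidCards) ∧
   ¬(enemy_cards = [] ∧ ¬("black_joker" ∈ my_cards ∧ "color_joker" ∈ my_cards) ∧
     ∃ c ∈ my_cards, 4 ≤ my_cards.count c))

instance (enemy_cards : List String) (my_cards : List String) : Decidable (Pre_boom_cover enemy_cards my_cards) := by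
  unfold Pre_boom_cover; infer_instance

def pvWitness_boom_cover : List String × List String := (["3"], ["4", "4", "4", "4"])

def Spec_boom_cover (enemy_cards : List String) (my_cards : List String) (out : List String) : Prop := out = boom_cover_alt enemy_cards my_cards
instance (enemy_cards : List String) (my_cards : List String) (out : List String) : Decidable (Spec_boom_cover enemy_cards my_cards out) := by unfold Spec_boom_cover; infer_instance

-- ===== CLAIM (what is proved, stated in full; the proofs are below) =====
def Claim_equal_boom_cover : Prop := ∀ (enemy_cards : List String) (my_cards : List String), Dom_boom_cover enemy_cards my_cards → Pre_boom_cover enemy_cards my_cards → Spec_boom_cover enemy_cards my_cards (boom_cover enemy_cards my_cards)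

-- ===== LEMMAS AND PROOFS =====

lemma pvCode_inj : ∀ x ∈ pvValidCards, ∀ c ∈ pvValidCards, pvCode? x = pvCode? c → x = c := by
  decide

lemma pvMapM_length {l : List String} {ds : List Int} (h : l.mapM pvCode? = some ds) :
    ds.length = l.length := by
  induction l generalizing ds with
  | nil => simp_all
  | cons x t ih =>
    rw [List.mapM_cons] at h
    cases hx : pvCode? x with
    | none => simp [hx] at h
    | some v =>
      cases ht : t.mapM pvCode? with
      | none => simp [hx, ht] at h
      | some ds' =>
        simp [hx, ht] at h
        subst h
        simp [ih ht]

lemma pvMapM_mem {l : List String} {ds : List Int} (hmc : l.mapM pvCode? = some ds)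
    {c : String} {v : Int} (hc : c ∈ l) (hv : pvCode? c = some v) : v ∈ ds := by
  induction l generalizing ds with
  | nil => simp at hc
  | cons x t ih =>
    rw [List.mapM_cons] at hmc
    cases hx : pvCode? x with
    | none => simp [hx] at hmc
    | some w =>
      cases ht : t.mapM pvCode? with
      | none => simp [hx, ht] at hmc
      | some ds' =>
        simp [hx, ht] at hmc
        subst hmc
        rcases List.mem_cons.mp hc with rfl | hct
        · rw [hx] at hv; simp [Option.some_inj.mp hv]
        · exact List.mem_cons_of_mem _ (ih ht hct)

lemma pvMapM_mem_rev {l : List String} {ds : List Int} (hmc : l.mapM pvCode? = some ds)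
    {v : Int} (hv : v ∈ ds) : ∃ c ∈ l, pvCode? c = some v := by
  induction l generalizing ds with
  | nil => simp_all
  | cons x t ih =>
    rw [List.mapM_cons] at hmc
    cases hx : pvCode? x with
    | none => simp [hx] at hmc
    | some w =>
      cases ht : t.mapM pvCode? with
      | none => simp [hx, ht] at hmc
      | some ds' =>
        simp [hx, ht] at hmc
        subst hmc
        rcases List.mem_cons.mp hv with rfl | hvt
        · exact ⟨x, by simp, hx⟩
        · rcases ih ht hvt with ⟨c, hc1, hc2⟩
          exact ⟨c, by simp [hc1], hc2⟩

lemma pvCount_eq {l : List String} {ds : List Int} (hvl : ∀ c ∈ l, c ∈ pvValidCards)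
    (hmc : l.mapM pvCode? = some ds) {c : String} {v : Int} (hcv : c ∈ pvValidCards)
    (hv : pvCode? c = some v) : ds.count v = l.count c := by
  induction l generalizing ds with
  | nil => simp_all
  | cons x t ih =>
    rw [List.mapM_cons] at hmc
    cases hx : pvCode? x with
    | none => simp [hx] at hmc
    | some w =>
      cases ht : t.mapM pvCode? with
      | none => simp [hx, ht] at hmc
      | some ds' =>
        simp [hx, ht] at hmc
        subst hmc
        have hxval : x ∈ pvValidCards := hvl x (by simp)
        have hiff : (w = v) ↔ (x = c) := by
          constructor
          · intro h
            subst h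
            exact pvCode_inj x hxval c hcv (by rw [hx, hv])
          · intro h
            subst h
            rw [hx] at hv
            exact (Option.some_inj.mp hv)
        have hrest := ih (fun c hc => hvl c (by simp [hc])) ht
        simp only [List.count_cons, hrest]
        by_cases h : w = v
        · simp [h, hiff.mp h]
        · have : ¬ x = c := fun hc => h (hiff.mpr hc)
          simp [h, this]

-- abstract middle form: scan the sorted hand, at each suffix test "head is a bomb value
-- still having count >= 4 here and beats e"
def pvG (e : Int) : List Int → List String
  | [] => []
  | a :: t => if 4 ≤ (a :: t).count a ∧ e < a then [pvRev a, pvRev a, pvRev a, pvRev a]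
              else pvG e t

lemma pvG_cons (e a : Int) (t : List Int) :
    pvG e (a :: t) = if 4 ≤ (a :: t).count a ∧ e < a
      then [pvRev a, pvRev a, pvRev a, pvRev a] else pvG e t := rfl

lemma pvLoopA_cons (en : List Int) (a b c d : Int) (t : List Int) :
    pvLoopA en (a :: b :: c :: d :: t) =
      if a = d then
        (match PySem.List.pyGet? en 0 with
          | some e => if e < a then [pvRev a, pvRev a, pvRev a, pvRev a]
                      else pvLoopA en (b :: c :: d :: t)
          | none => [])
      else pvLoopA en (b :: c :: d :: t) := rfl

lemma pvMapM_some {l : List String} (h : ∀ c ∈ l, c ∈ pvValidCards) :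
    ∃ ds, l.mapM pvCode? = some ds := by
  induction l with
  | nil => exact ⟨[], rfl⟩
  | cons x t ih =>
    have hx : x ∈ pvValidCards := h x (by simp)
    have hxs : (pvCode? x).isSome := by
      simp [pvValidCards] at hx
      rcases hx with rfl|rfl|rfl|rfl|rfl|rfl|rfl|rfl|rfl|rfl|rfl|rfl|rfl|rfl|rfl <;> decide
    rcases Option.isSome_iff_exists.mp hxs with ⟨v, hv⟩
    rcases ih (fun c hc => h c (by simp [hc])) with ⟨ds, hds⟩
    exact ⟨v :: ds, by simp [List.mapM_cons, hv, hds]⟩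

lemma pvLoopA_nil : ∀ s, pvLoopA [] s = [] := by
  intro s
  induction s with
  | nil => rfl
  | cons a t ih =>
    match t, ih with
    | b :: c :: d :: t', ih =>
      by_cases h : a = d <;>
        simp [pvLoopA, h, show PySem.List.pyGet? ([] : List Int) 0 = none from rfl] <;>
        exact ih
    | [], _ | [_], _ | [_, _], _ => rfl

lemma pvG_short {e : Int} {s : List Int} (h : s.length < 4) : pvG e s = [] := by
  induction s with
  | nil => rfl
  | cons a t ih =>
    have hc : (a :: t).count a ≤ (a :: t).length := List.count_le_length
    have : ¬ (4 ≤ ((a :: t).count a : Nat) ∧ e < a) := by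
      rintro ⟨h4, -⟩; omega
    rw [pvG_cons, if_neg this]
    exact ih (by simpa using Nat.lt_of_le_of_lt (Nat.le_succ t.length) h)

-- on a sorted suffix a :: b :: c :: d :: t, the window test a = d is exactly "count a >= 4"
lemma pvWindow_iff {a b c d : Int} {t : List Int}
    (hp : (a :: b :: c :: d :: t).Pairwise (· ≤ ·)) :
    a = d ↔ 4 ≤ (a :: b :: c :: d :: t).count a := by
  rcases List.pairwise_cons.mp hp with ⟨ha, hp1⟩
  rcases List.pairwise_cons.mp hp1 with ⟨hb, hp2⟩
  rcases List.pairwise_cons.mp hp2 with ⟨hc, hp3⟩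
  have hab : a ≤ b := ha b (by simp)
  have hbc : b ≤ c := hb c (by simp)
  have hcd : c ≤ d := hc d (by simp)
  constructor
  · intro had
    have hb' : b = a := by omega
    have hc' : c = a := by omega
    subst had hb' hc'
    simp [List.count_cons]
  · intro h4
    by_contra had
    have hlt : a < d := lt_of_le_of_ne (by omega) had
    -- every element of t is ≥ d > a, so count of a in d :: t is 0
    have hdt : (d :: t).count a = 0 := by
      rw [List.count_eq_zero]
      intro hmem
      rcases List.mem_cons.mp hmem with rfl | hmt
      · omega
      · have := hc a (by simp [hmt]); have := (List.pairwise_cons.mp hp3).1 a hmt; omega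
    have hca : (a :: b :: c :: d :: t).count a
        = 1 + (if b = a then 1 else 0) + (if c = a then 1 else 0) + (d :: t).count a := by
      simp [List.count_cons]; split_ifs <;> omega
    rw [hdt] at hca
    split_ifs at hca <;> omega

lemma pvLoopA_eq_pvG {en : List Int} {e : Int} (he : PySem.List.pyGet? en 0 = some e)
    {s : List Int} (hs : s.Pairwise (· ≤ ·)) : pvLoopA en s = pvG e s := by
  induction s with
  | nil => rfl
  | cons a t ih =>
    match t, hs, ih with
    | b :: c :: d :: t', hs, ih =>
      have hiff := pvWindow_iff hs
      by_cases had : a = d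
      · have h4 : 4 ≤ (a :: b :: c :: d :: t').count a := hiff.mp had
        subst had
        by_cases hea : e < a
        · rw [pvLoopA_cons, pvG_cons, if_pos rfl, he, if_pos (And.intro h4 hea)]
          simp [hea]
        · have hng : ¬ (4 ≤ (a :: b :: c :: a :: t').count a ∧ e < a) := fun h => hea h.2
          rw [pvLoopA_cons, pvG_cons, if_pos rfl, he, if_neg hng]
          simp only [hea, if_false]
          exact ih (List.Pairwise.sublist (by simp) hs)
      · have h4 : ¬ 4 ≤ (a :: b :: c :: d :: t').count a := fun h => had (hiff.mpr h)
        have hng : ¬ (4 ≤ (a :: b :: c :: d :: t').count a ∧ e < a) := fun h => h4 h.1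
        rw [pvLoopA_cons, pvG_cons, if_neg had, if_neg hng]
        exact ih (List.Pairwise.sublist (by simp) hs)
    | [], _, _ =>
      simp [pvLoopA, pvG_short (e := e) (s := [a]) (by simp)]
    | [x], _, _ =>
      simp [pvLoopA, pvG_short (e := e) (s := [a, x]) (by simp)]
    | [x, y], _, _ =>
      simp [pvLoopA, pvG_short (e := e) (s := [a, x, y]) (by simp)]

lemma pvFindCand_nil {e : Int} {C : List Int} (h : ∀ v ∈ C, ¬ e < v) :
    pvFindCand e C = [] := by
  induction C with
  | nil => rfl
  | cons c0 C' ih =>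
    simp only [pvFindCand, if_neg (h c0 (by simp))]
    exact ih fun v hv => h v (by simp [hv])

lemma pvFindCand_min {e a : Int} {C : List Int} (hC : C.Pairwise (· < ·)) (haC : a ∈ C)
    (hea : e < a) (hmin : ∀ v ∈ C, e < v → a ≤ v) :
    pvFindCand e C = [pvRev a, pvRev a, pvRev a, pvRev a] := by
  induction C with
  | nil => simp at haC
  | cons c0 C' ih =>
    by_cases h0 : e < c0
    · have h1 : a ≤ c0 := hmin c0 (by simp) h0
      have h2 : c0 ≤ a := by
        rcases List.mem_cons.mp haC with rfl | ha'
        · exact le_rfl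
        · exact le_of_lt ((List.pairwise_cons.mp hC).1 a ha')
      have hca : c0 = a := le_antisymm h2 h1
      subst hca
      simp [pvFindCand, h0]
    · have ha' : a ∈ C' := by
        rcases List.mem_cons.mp haC with rfl | ha'
        · exact absurd hea h0
        · exact ha'
      simp only [pvFindCand, if_neg h0]
      exact ih (List.pairwise_cons.mp hC).2 ha' fun v hv => hmin v (by simp [hv])

-- main bridge: the sorted-suffix scan pvG equals the candidate scan pvFindCand, for any
-- strictly increasing candidate list C that is exact above e
lemma pvG_eq_pvFindCand {e : Int} {s C : List Int} (hs : s.Pairwise (· ≤ ·))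
    (hC : C.Pairwise (· < ·)) (hmem : ∀ v, e < v → (v ∈ C ↔ 4 ≤ s.count v)) :
    pvG e s = pvFindCand e C := by
  induction s generalizing C with
  | nil =>
    refine (pvFindCand_nil fun v hv hev => ?_).symm
    have := (hmem v hev).mp hv
    simp at this
  | cons a t ih =>
    rcases List.pairwise_cons.mp hs with ⟨hat, ht⟩
    by_cases hcase : 4 ≤ (a :: t).count a ∧ e < a
    · rcases hcase with ⟨h4, hea⟩
      rw [pvG_cons, if_pos (And.intro h4 hea)]
      refine (pvFindCand_min hC ((hmem a hea).mpr h4) hea ?_).symm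
      intro v hv hev
      have h4v : 4 ≤ (a :: t).count v := (hmem v hev).mp hv
      have hvmem : v ∈ a :: t := List.count_pos_iff.mp (by omega)
      rcases List.mem_cons.mp hvmem with rfl | hvt
      · exact le_rfl
      · exact hat v hvt
    · rw [pvG_cons, if_neg hcase]
      refine ih ht hC ?_
      intro v hev
      rw [hmem v hev]
      by_cases hva : v = a
      · subst hva
        have hna : ¬ 4 ≤ (v :: t).count v := fun h => hcase ⟨h, hev⟩
        have : (v :: t).count v = t.count v + 1 := by simp [List.count_cons]
        constructor <;> intro h <;> omega
      · have : (a :: t).count v = t.count v := by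
          simp [List.count_cons, (Ne.symm hva : a ≠ v)]
        omega

-- head of sorted(ec) equals min(ec) (as values)
lemma pvHead_sorted_eq_min {ec : List Int} {h0 : Int} {t : List Int}
    (hs : PySem.List.sorted ec (fun x => x) false = h0 :: t) :
    PySem.List.min? ec (fun x => x) = some h0 := by
  cases hm : PySem.List.min? ec (fun x => x) with
  | none =>
    have hnil := (PySem.List.min?_eq_none_iff ec (fun x => x)).mp hm
    subst hnil
    rw [(PySem.List.sorted_eq_nil_iff ([] : List Int) (fun x => x) false).mpr rfl] at hs
    cases hs
  | some m =>
    have hmmem : m ∈ ec := PySem.List.min?_mem hm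
    have hmmin : ∀ y ∈ ec, m ≤ y := fun y hy => PySem.List.min?_isMin hm y hy
    have hh0mem : h0 ∈ ec := by
      have : h0 ∈ PySem.List.sorted ec (fun x => x) false := by rw [hs]; simp
      exact (PySem.List.mem_sorted ec (fun x => x) false h0).mp this
    have hh0min : ∀ y ∈ ec, h0 ≤ y := PySem.List.key_head_sorted_le ec (fun x => x) hs
    exact congrArg some (le_antisymm (hmmin h0 hh0mem) (hh0min m hmmem))

-- ===== VERDICT (by name: the statement is the Claim_ definition above) =====
theorem boom_cover_spec : Claim_equal_boom_cover := by
  intro enemy_cards my_cards _ hpre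
  unfold Spec_boom_cover boom_cover boom_cover_alt
  by_cases hbj : "black_joker" ∈ enemy_cards
  · simp [hbj]
  · rcases hpre with hbj' | ⟨hve, hvm, hcrash⟩
    · exact absurd hbj' hbj
    rcases pvMapM_some hvm with ⟨mc, hmc⟩
    rcases pvMapM_some hve with ⟨ec, hec⟩
    simp only [if_neg hbj, hmc, hec]
    -- shared names
    set s := PySem.List.sorted mc (fun x => x) false with hs_def
    have hs : s.Pairwise (· ≤ ·) := PySem.List.sorted_pairwise mc (fun x => x)
    have hperm : s.Perm mc := PySem.List.sorted_perm mc (fun x => x) false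
    have hmem17 : ((17 : Int) ∈ s ∧ (18 : Int) ∈ s) ↔ ((17 : Int) ∈ mc ∧ (18 : Int) ∈ mc) := by
      rw [hs_def]; simp [PySem.List.mem_sorted]
    by_cases hrk : (17 : Int) ∈ mc ∧ (18 : Int) ∈ mc
    · simp [hmem17.mpr hrk, hrk]
    · rw [if_neg (fun h => hrk (hmem17.mp h)), if_neg hrk]
      -- candidate list of B
      set C := PySem.List.sorted
          ((PySem.Set.ofList mc).filter (fun v => 4 ≤ mc.count v)) (fun x => x) false with hC_def
      have hCstrict : C.Pairwise (· < ·) := by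
        have hnd : ((PySem.Set.ofList mc).filter (fun v => 4 ≤ mc.count v)).Nodup :=
          (PySem.Set.nodup_ofList mc).filter _
      -- sorted of a nodup list is nodup and pairwise ≤, hence pairwise <
        have hperm' : C.Perm ((PySem.Set.ofList mc).filter (fun v => 4 ≤ mc.count v)) :=
          PySem.List.sorted_perm _ (fun x => x) false
        have hnd' : C.Nodup := hperm'.nodup_iff.mpr hnd
        have hle : C.Pairwise (· ≤ ·) := PySem.List.sorted_pairwise _ (fun x => x)
        exact (hle.and hnd').imp (fun h => lt_of_le_of_ne h.1 h.2)
      have hmemC : ∀ v : Int, v ∈ C ↔ 4 ≤ s.count v := by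
        intro v
        have hcount : s.count v = mc.count v := hperm.count_eq v
        rw [hC_def, PySem.List.mem_sorted, List.mem_filter, hcount]
        constructor
        · rintro ⟨-, h⟩; exact of_decide_eq_true h
        · intro h
          refine ⟨?_, decide_eq_true h⟩
          have : 0 < mc.count v := by omega
          exact (PySem.Set.mem_ofList mc v).mpr (List.count_pos_iff.mp this)
      by_cases hlen : s.length < 4
      · -- A returns []; C must be empty so B returns []
        have hCnil : C = [] := by
          cases hC : C with
          | nil => rfl
          | cons v C' =>
            exfalso
            have h4 : 4 ≤ s.count v := (hmemC v).mp (by simp [hC])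
            have := List.count_le_length (l := s) (a := v)
            omega
        simp [hlen, hCnil]
      · rw [if_neg hlen]
        cases hC : C with
        | nil =>
          -- no bomb candidates: A's loop returns [] too
          have hnone : ∀ v : Int, ¬ 4 ≤ s.count v := by
            intro v h4
            have : v ∈ C := (hmemC v).mpr h4
            simp [hC] at this
          cases hen : PySem.List.sorted ec (fun x => x) false with
          | nil => exact pvLoopA_nil s
          | cons e0 t =>
            rw [pvLoopA_eq_pvG (en := e0 :: t) (e := e0)
              (by simp [PySem.List.pyGet?, PySem.List.pyIdx?]) hs]
            rw [pvG_eq_pvFindCand (C := []) hs (by simp) (fun v hv => by simp [hnone v])]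
            rfl
        | cons v C' =>
          -- B now decodes the enemy and takes its min; Pre_ rules out ec = []
          have hecne : ec ≠ [] := by
            intro hnil
            subst hnil
            have henil : enemy_cards = [] := by
              have hlen0 := pvMapM_length hec
              cases enemy_cards with
              | nil => rfl
              | cons x xs => simp at hlen0
            -- a bomb candidate exists: v ∈ C
            have h4 : 4 ≤ s.count v := (hmemC v).mp (by simp [hC])
            have hvmc : 4 ≤ mc.count v := by rw [← hperm.count_eq v]; exact h4
            -- lift to a string-level four-of-a-kind
            have hbomb : ∃ c ∈ my_cards, 4 ≤ my_cards.count c := by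
              have hvmem : v ∈ mc := List.count_pos_iff.mp (by omega)
              rcases pvMapM_mem_rev hmc hvmem with ⟨c, hcmem, hcdec⟩
              refine ⟨c, hcmem, ?_⟩
              rw [← pvCount_eq hvm hmc (hvm c hcmem) hcdec]
              exact hvmc
            -- rocket absent at the string level
            have hrkstr : ¬("black_joker" ∈ my_cards ∧ "color_joker" ∈ my_cards) := by
              rintro ⟨h17, h18⟩
              exact hrk ⟨pvMapM_mem hmc h17 (by decide), pvMapM_mem hmc h18 (by decide)⟩
            exact hcrash ⟨henil, hrkstr, hbomb⟩
          obtain ⟨m, hm⟩ : ∃ m, PySem.List.min? ec (fun x => x) = some m := by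
            cases hm' : PySem.List.min? ec (fun x => x) with
            | none => exact absurd ((PySem.List.min?_eq_none_iff ec (fun x => x)).mp hm') hecne
            | some m => exact ⟨m, rfl⟩
          have hensorted : ∃ t, PySem.List.sorted ec (fun x => x) false = m :: t := by
            cases hen : PySem.List.sorted ec (fun x => x) false with
            | nil => exact absurd ((PySem.List.sorted_eq_nil_iff ec (fun x => x) false).mp hen) hecne
            | cons e0 t =>
              have h1 := pvHead_sorted_eq_min hen
              rw [hm] at h1
              cases h1
              exact ⟨t, rfl⟩
          rcases hensorted with ⟨t, hen⟩
          rw [hC] at hCstrict hmemC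
          rw [hen, pvLoopA_eq_pvG (en := m :: t) (e := m)
            (by simp [PySem.List.pyGet?, PySem.List.pyIdx?]) hs, hm]
          exact pvG_eq_pvFindCand hs hCstrict (fun v' hv' => hmemC v')
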